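-- pv_equiv track=rewrite | github.com/cocobi24/advent_of_code_2024 | solution/day02.py | Q1_SOLUTION
-- ===== SOURCE A (Python) =====
-- def Q1_SOLUTION(line):
--   sline = sorted(line)
--   l = len(line)
--   if line == sline or line == sline[::-1]:
--     for i in range(1, l):
--       if abs(line[i] - line[i - 1]) > 3 or line[i] == line[i - 1]:
--         return False
--     return True
--   return False
-- ===== SOURCE B (Python) =====
-- def Q1_SOLUTION(line):
--     diffs = [b - a for a, b in zip(line, line[1:])]
--     return all(1 <= d <= 3 for d in diffs) or all(-3 <= d <= -1 for d in diffs)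
-- ===== Notes on version B (the rewrite author's own statement) =====
-- stated objective: alternative
-- what changed: B drops A's sort-and-compare monotonicity test plus index loop and instead checks the adjacent-difference list in a single linear pass: accept iff every difference is between 1 and 3, or every difference is between -3 and -1.
import Mathlib
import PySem

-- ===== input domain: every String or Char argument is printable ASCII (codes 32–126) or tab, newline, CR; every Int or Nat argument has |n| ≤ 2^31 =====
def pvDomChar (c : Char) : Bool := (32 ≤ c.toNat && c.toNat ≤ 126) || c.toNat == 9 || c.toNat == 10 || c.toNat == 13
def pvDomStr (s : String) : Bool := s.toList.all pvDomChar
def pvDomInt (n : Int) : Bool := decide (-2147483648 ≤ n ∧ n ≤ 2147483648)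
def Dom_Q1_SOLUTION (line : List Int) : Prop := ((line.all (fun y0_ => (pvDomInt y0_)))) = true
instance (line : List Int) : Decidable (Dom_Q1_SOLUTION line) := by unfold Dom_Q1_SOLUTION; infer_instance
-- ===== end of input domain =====

-- B replaces A's sort-and-compare monotonicity test by a single pass over the
-- adjacent differences (all between 1 and 3, or all between -3 and -1); objective: alternative algorithm.


-- ===== PORT A =====
-- the 'for i in range(1, l): … return False … / return True' loop of A
def pvALoop (line : List Int) : List Int → Bool
  | [] => true
  | i :: rest =>
    if 3 < |PySem.List.pyGetD line i 0 - PySem.List.pyGetD line (i - 1) 0|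
       || PySem.List.pyGetD line i 0 == PySem.List.pyGetD line (i - 1) 0 then false
    else pvALoop line rest

def Q1_SOLUTION (line : List Int) : Bool :=
  let sline := PySem.List.sorted line (fun x => x) false
  let l := line.length
  if line == sline || line == (PySem.List.slice? sline none none (-1)).getD [] then
    pvALoop line (PySem.List.pyRange 1 (l : Int) 1)
  else false

-- ===== PORT B =====
def Q1_SOLUTION_alt (line : List Int) : Bool :=
  let diffs := (line.zip (line.drop 1)).map (fun p => p.2 - p.1)
  diffs.all (fun d => decide (1 ≤ d) && decide (d ≤ 3))
    || diffs.all (fun d => decide (-3 ≤ d) && decide (d ≤ -1))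

-- ===== PRECONDITION & SPEC =====
def Spec_Q1_SOLUTION (line : List Int) (out : Bool) : Prop := out = Q1_SOLUTION_alt line
instance (line : List Int) (out : Bool) : Decidable (Spec_Q1_SOLUTION line out) := by unfold Spec_Q1_SOLUTION; infer_instance

-- ===== CLAIM (what is proved, stated in full; the proofs are below) =====
def Claim_equal_Q1_SOLUTION : Prop := ∀ (line : List Int), Dom_Q1_SOLUTION line → Spec_Q1_SOLUTION line (Q1_SOLUTION line)

-- ===== LEMMAS AND PROOFS =====

theorem pvALoop_eq_all (line : List Int) (idxs : List Int) :
    pvALoop line idxs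
      = idxs.all (fun i =>
          !(3 < |PySem.List.pyGetD line i 0 - PySem.List.pyGetD line (i - 1) 0|
            || PySem.List.pyGetD line i 0 == PySem.List.pyGetD line (i - 1) 0)) := by
  induction idxs with
  | nil => rfl
  | cons i rest ih =>
    simp only [pvALoop, List.all_cons]
    split_ifs with h
    · simp [h]
    · simp [h, ih]

theorem pv_sorted_self_iff (line : List Int) :
    line = PySem.List.sorted line (fun x => x) false ↔ line.Pairwise (· ≤ ·) := by
  constructor
  · intro h
    have := PySem.List.sorted_pairwise line (fun x => x)
    rw [← h] at this
    exact this
  · intro h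
    exact (PySem.List.sorted_eq_self_of_pairwise line (fun x => x) h).symm

theorem pv_sorted_rev_iff (line : List Int) :
    line = (PySem.List.sorted line (fun x => x) false).reverse
      ↔ line.Pairwise (· ≥ ·) := by
  constructor
  · intro h
    have hr := congrArg List.reverse h
    rw [List.reverse_reverse] at hr
    have := PySem.List.sorted_pairwise line (fun x => x)
    rw [← hr] at this
    simpa [List.pairwise_reverse] using this
  · intro h
    have hp : line.reverse.Pairwise (fun a b => (fun x : Int => x) a ≤ (fun x : Int => x) b) := by
      simpa [List.pairwise_reverse] using h
    have e1 : PySem.List.sorted line.reverse (fun x => x) false = line.reverse :=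
      PySem.List.sorted_eq_self_of_pairwise line.reverse (fun x => x) hp
    have e2 : PySem.List.sorted line (fun x => x) false
        = PySem.List.sorted line.reverse (fun x => x) false :=
      PySem.List.sorted_eq_sorted_of_perm line line.reverse (fun x => x)
        (fun _ _ hxy => hxy) line.reverse_perm.symm
    rw [e2, e1, List.reverse_reverse]

-- B's 'all over the adjacent-difference list' as an IsChain
theorem pv_diffs_all_iff_chain (p : Int → Bool) (l : List Int) :
    (((l.zip (l.drop 1)).map (fun q : Int × Int => q.2 - q.1)).all p = true)
      ↔ l.IsChain (fun a b => p (b - a) = true) := by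
  induction l with
  | nil => simp
  | cons a t ih =>
    cases t with
    | nil => simp
    | cons b t' =>
      simp only [List.drop_succ_cons, List.drop_zero, List.zip_cons_cons, List.map_cons,
        List.all_cons, Bool.and_eq_true, List.isChain_cons_cons] at *
      exact and_congr Iff.rfl ih

-- A's index loop as an IsChain
theorem pv_aloop_iff_chain (line : List Int) :
    (pvALoop line (PySem.List.pyRange 1 (line.length : Int) 1) = true)
      ↔ line.IsChain (fun a b => |b - a| ≤ 3 ∧ b ≠ a) := by
  rw [pvALoop_eq_all, List.all_eq_true, List.isChain_iff_getElem]
  constructor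
  · intro h i hi
    have hm : ((i + 1 : Nat) : Int) ∈ PySem.List.pyRange 1 (line.length : Int) 1 := by
      rw [PySem.List.mem_pyRange_one]
      omega
    have hx := h _ hm
    have e : ((i + 1 : Nat) : Int) - 1 = (i : Int) := by omega
    rw [e] at hx
    simp only [PySem.List.pyGetD_natCast] at hx
    rw [List.getD_eq_getElem line 0 (by omega), List.getD_eq_getElem line 0 (by omega)] at hx
    simp only [Bool.not_eq_eq_eq_not, Bool.not_true, Bool.or_eq_false_iff,
      decide_eq_false_iff_not, not_lt, beq_eq_false_iff_ne, ne_eq] at hx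
    exact ⟨hx.1, hx.2⟩
  · intro h i hm
    rw [PySem.List.mem_pyRange_one] at hm
    have hn : i = (((i - 1).toNat + 1 : Nat) : Int) := by omega
    rw [hn] at hm ⊢
    have hi : (i - 1).toNat + 1 < line.length := by omega
    have hx := h (i - 1).toNat hi
    have e : (((i - 1).toNat + 1 : Nat) : Int) - 1 = (((i - 1).toNat : Nat) : Int) := by omega
    rw [e]
    simp only [PySem.List.pyGetD_natCast]
    rw [List.getD_eq_getElem line 0 (by omega), List.getD_eq_getElem line 0 (by omega)]
    simp only [Bool.not_eq_eq_eq_not, Bool.not_true, Bool.or_eq_false_iff,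
      decide_eq_false_iff_not, not_lt, beq_eq_false_iff_ne, ne_eq]
    exact ⟨hx.1, hx.2⟩

theorem pv_main (line : List Int) : Q1_SOLUTION line = Q1_SOLUTION_alt line := by
  have hA : (Q1_SOLUTION line = true)
      ↔ ((line.Pairwise (· ≤ ·) ∨ line.Pairwise (· ≥ ·))
          ∧ line.IsChain (fun a b => |b - a| ≤ 3 ∧ b ≠ a)) := by
    unfold Q1_SOLUTION
    simp only [PySem.List.slice?_none_none_neg_one, Option.getD_some]
    split_ifs with h
    · simp only [Bool.or_eq_true, beq_iff_eq] at h
      rw [pv_aloop_iff_chain]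
      constructor
      · intro hc
        refine ⟨?_, hc⟩
        rcases h with h | h
        · exact Or.inl ((pv_sorted_self_iff line).mp h)
        · exact Or.inr ((pv_sorted_rev_iff line).mp h)
      · exact fun hc => hc.2
    · simp only [Bool.or_eq_true, beq_iff_eq] at h
      push Not at h
      constructor
      · intro hf; exact absurd hf (by simp)
      · rintro ⟨hmono, _⟩
        rcases hmono with hm | hm
        · exact absurd ((pv_sorted_self_iff line).mpr hm) h.1
        · exact absurd ((pv_sorted_rev_iff line).mpr hm) h.2
  have hB : (Q1_SOLUTION_alt line = true)
      ↔ (line.IsChain (fun a b => 1 ≤ b - a ∧ b - a ≤ 3)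
          ∨ line.IsChain (fun a b => -3 ≤ b - a ∧ b - a ≤ -1)) := by
    unfold Q1_SOLUTION_alt
    simp only [Bool.or_eq_true]
    rw [pv_diffs_all_iff_chain, pv_diffs_all_iff_chain]
    simp
  rw [Bool.eq_iff_iff, hA, hB]
  rw [← List.isChain_iff_pairwise (R := (· ≤ ·)), ← List.isChain_iff_pairwise (R := (· ≥ ·))]
  simp only [List.isChain_iff_getElem]
  constructor
  · rintro ⟨hmono, hstep⟩
    rcases hmono with hm | hm
    · left; intro i hi
      have h1 := hm i hi
      obtain ⟨h2, h3⟩ := hstep i hi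
      rw [abs_le] at h2
      exact ⟨by omega, by omega⟩
    · right; intro i hi
      have h1 := hm i hi
      obtain ⟨h2, h3⟩ := hstep i hi
      rw [abs_le] at h2
      exact ⟨by omega, by omega⟩
  · rintro (h | h)
    · refine ⟨Or.inl fun i hi => ?_, fun i hi => ?_⟩
      · have := h i hi; omega
      · obtain ⟨h1, h2⟩ := h i hi
        exact ⟨by rw [abs_le]; omega, by omega⟩
    · refine ⟨Or.inr fun i hi => ?_, fun i hi => ?_⟩
      · have := h i hi; omega
      · obtain ⟨h1, h2⟩ := h i hi
        exact ⟨by rw [abs_le]; omega, by omega⟩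

-- ===== VERDICT (by name: the statement is the Claim_ definition above) =====
theorem Q1_SOLUTION_spec : Claim_equal_Q1_SOLUTION := by
  intro line _
  unfold Spec_Q1_SOLUTION
  exact pv_main line
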